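-- pv_equiv track=rewrite | github.com/praveentn/sigmocatclash | cogs/game.py | _leaderboard_text
-- ===== SOURCE A (Python) =====
-- from typing import Optional
--
-- MEDALS = ["🥇", "🥈", "🥉"]
--
-- def _leaderboard_text(leaderboard: list[tuple[str, int]], max_entries: int = 8) -> str:
--     if not leaderboard:
--         return "No scores yet!"
--     lines = []
--     prev_score: Optional[int] = None
--     rank = 0
--     for i, (name, score) in enumerate(leaderboard[:max_entries]):
--         if score != prev_score:
--             rank = i + 1
--             prev_score = score
--         medal = MEDALS[rank - 1] if rank <= 3 else f"**#{rank}**"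
--         suffix = "pt" if score == 1 else "pts"
--         lines.append(f"{medal} **{name}** — {score} {suffix}")
--     return "\n".join(lines)
-- ===== SOURCE B (Python) =====
-- MEDALS = ["🥇", "🥈", "🥉"]
--
-- def _leaderboard_text(leaderboard: list[tuple[str, int]], max_entries: int = 8) -> str:
--     # Group the sliced leaderboard into runs of equal adjacent scores; each run
--     # shares one rank (position of its first entry) and one medal/suffix.
--     if not leaderboard:
--         return "No scores yet!"
--     entries = leaderboard[:max_entries]
--     n = len(entries)
--     lines = []
--     i = 0
--     while i < n:
--         score = entries[i][1]
--         j = i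
--         while j < n and entries[j][1] == score:
--             j += 1
--         rank = i + 1
--         medal = MEDALS[rank - 1] if rank <= 3 else f"**#{rank}**"
--         suffix = "pt" if score == 1 else "pts"
--         for name, s in entries[i:j]:
--             lines.append(f"{medal} **{name}** — {s} {suffix}")
--         i = j
--     return "\n".join(lines)
-- ===== Notes on version B (the rewrite author's own statement) =====
-- stated objective: alternative
-- what changed: Replaces the per-item prev_score/rank tracking fold with an outer loop over maximal runs of equal adjacent scores: each run's rank and medal are computed once from the run's starting index and applied to all its members.
import Mathlib
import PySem

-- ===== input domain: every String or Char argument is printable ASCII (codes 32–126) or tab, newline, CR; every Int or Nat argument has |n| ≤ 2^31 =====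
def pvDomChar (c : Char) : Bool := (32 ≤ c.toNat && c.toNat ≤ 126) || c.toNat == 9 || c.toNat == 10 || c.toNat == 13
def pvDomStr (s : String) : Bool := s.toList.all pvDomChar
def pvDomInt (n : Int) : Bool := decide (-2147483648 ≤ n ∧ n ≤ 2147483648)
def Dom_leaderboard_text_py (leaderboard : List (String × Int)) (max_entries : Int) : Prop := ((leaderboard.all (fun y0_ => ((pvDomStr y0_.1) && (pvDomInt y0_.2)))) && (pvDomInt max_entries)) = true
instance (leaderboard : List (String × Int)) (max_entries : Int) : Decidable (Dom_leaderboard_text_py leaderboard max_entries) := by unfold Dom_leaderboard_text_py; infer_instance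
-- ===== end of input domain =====

-- B replaces A's per-item prev_score/rank tracking with an outer loop over maximal
-- runs of equal adjacent scores (objective: alternative decomposition, same cost).

-- ===== PORT A =====
def pvMEDALS : List String := ["🥇", "🥈", "🥉"]

-- one iteration of A's for-loop; state = (lines, prev_score, rank)
-- MEDALS[rank-1]: rank ∈ {1,2,3} whenever rank ≤ 3 here, so the index is always in
-- range and pyGetD's default is never used.
def pvAStep (st : List String × Option Int × Int) (p : Int × (String × Int)) :
    List String × Option Int × Int :=
  let i := p.1; let name := p.2.1; let score := p.2.2
  let (rank, prev) := if st.2.1 ≠ some score then (i + 1, some score) else (st.2.2, st.2.1)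
  let medal := if rank ≤ 3 then PySem.List.pyGetD pvMEDALS (rank - 1) ""
               else "**#" ++ PySem.Int.toStr rank ++ "**"
  let suffix := if score == 1 then "pt" else "pts"
  (st.1 ++ [medal ++ " **" ++ name ++ "** — " ++ PySem.Int.toStr score ++ " " ++ suffix],
   prev, rank)

def leaderboard_text_py (leaderboard : List (String × Int)) (max_entries : Int) : String :=
  if leaderboard = [] then "No scores yet!"
  else
    let entries := PySem.List.slice leaderboard none (some max_entries)
    let st := (PySem.List.enumerate entries 0).foldl pvAStep ([], none, 0)
    PySem.Str.join "\n" st.1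

-- ===== PORT B =====
-- Source B's outer while-loop: each step consumes one maximal run of equal scores
-- starting at (Python) index i; the inner scan j / slice entries[i:j] is the
-- takeWhile/dropWhile split of the remaining list.
def pvBLoop : List (String × Int) → Int → List String
  | [], _ => []
  | (name, score) :: rest, i =>
      let run := rest.takeWhile (fun p => p.2 == score)
      let rest' := rest.dropWhile (fun p => p.2 == score)
      let rank := i + 1
      let medal := if rank ≤ 3 then PySem.List.pyGetD pvMEDALS (rank - 1) ""
                   else "**#" ++ PySem.Int.toStr rank ++ "**"
      let suffix := if score == 1 then "pt" else "pts"
      (((name, score) :: run).map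
        (fun p => medal ++ " **" ++ p.1 ++ "** — " ++ PySem.Int.toStr p.2 ++ " " ++ suffix))
        ++ pvBLoop rest' (i + 1 + run.length)
  termination_by l => l.length
  decreasing_by
    have := List.length_dropWhile_le (fun p => p.2 == score) rest
    simp only [List.length_cons]; omega

def leaderboard_text_py_alt (leaderboard : List (String × Int)) (max_entries : Int) : String :=
  if leaderboard = [] then "No scores yet!"
  else
    let entries := PySem.List.slice leaderboard none (some max_entries)
    PySem.Str.join "\n" (pvBLoop entries 0)

-- ===== PRECONDITION & SPEC =====
def Spec_leaderboard_text_py (leaderboard : List (String × Int)) (max_entries : Int) (out : String) : Prop := out = leaderboard_text_py_alt leaderboard max_entries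
instance (leaderboard : List (String × Int)) (max_entries : Int) (out : String) : Decidable (Spec_leaderboard_text_py leaderboard max_entries out) := by unfold Spec_leaderboard_text_py; infer_instance

-- ===== CLAIM (what is proved, stated in full; the proofs are below) =====
def Claim_equal_leaderboard_text_py : Prop := ∀ (leaderboard : List (String × Int)) (max_entries : Int), Dom_leaderboard_text_py leaderboard max_entries → Spec_leaderboard_text_py leaderboard max_entries (leaderboard_text_py leaderboard max_entries)

-- ===== LEMMAS AND PROOFS =====

-- A's fold over a run of elements whose score equals prev: the rank/prev state is
-- unchanged and each element is formatted with the current rank.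
theorem pvAStep_run (run : List (String × Int)) (score : Int)
    (h : ∀ p ∈ run, p.2 = score) :
    ∀ (rest : List (Int × (String × Int))) (i rank : Int) (acc : List String),
    ((PySem.List.enumerate run i ++ rest).foldl pvAStep (acc, some score, rank))
      = (rest.foldl pvAStep
          (acc ++ run.map (fun p =>
            (if rank ≤ 3 then PySem.List.pyGetD pvMEDALS (rank - 1) ""
             else "**#" ++ PySem.Int.toStr rank ++ "**")
            ++ " **" ++ p.1 ++ "** — " ++ PySem.Int.toStr p.2 ++ " "
            ++ (if p.2 == 1 then "pt" else "pts")), some score, rank)) := by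
  induction run with
  | nil => intro rest i rank acc; simp [PySem.List.enumerate_nil]
  | cons p run ih =>
      intro rest i rank acc
      have hp : p.2 = score := h p (by simp)
      have h' : ∀ q ∈ run, q.2 = score := fun q hq => h q (by simp [hq])
      simp only [PySem.List.enumerate_cons, List.cons_append, List.foldl_cons]
      rw [show pvAStep (acc, some score, rank) (i, p)
            = (acc ++ [(if rank ≤ 3 then PySem.List.pyGetD pvMEDALS (rank - 1) ""
                 else "**#" ++ PySem.Int.toStr rank ++ "**")
                ++ " **" ++ p.1 ++ "** — " ++ PySem.Int.toStr p.2 ++ " "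
                ++ (if p.2 == 1 then "pt" else "pts")], some score, rank) from by
            simp [pvAStep, hp]]
      rw [ih h' rest (i + 1) rank _]
      simp

-- A's fold equals B's run recursion whenever prev differs from the head score.
theorem pvFold_eq_bLoop (l : List (String × Int)) :
    ∀ (i rank : Int) (prev : Option Int) (acc : List String),
    (∀ name score rest, l = (name, score) :: rest → prev ≠ some score) →
    ((PySem.List.enumerate l i).foldl pvAStep (acc, prev, rank)).1 = acc ++ pvBLoop l i := by
  induction hn : l.length using Nat.strong_induction_on generalizing l with
  | _ n ih =>
    intro i rank prev acc hprev
    match l with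
    | [] => simp [PySem.List.enumerate_nil, pvBLoop]
    | (name, score) :: rest =>
      have hne : prev ≠ some score := hprev name score rest rfl
      simp only [PySem.List.enumerate_cons, List.foldl_cons]
      rw [show pvAStep (acc, prev, rank) (i, (name, score))
            = (acc ++ [(if i + 1 ≤ 3 then PySem.List.pyGetD pvMEDALS (i + 1 - 1) ""
                 else "**#" ++ PySem.Int.toStr (i + 1) ++ "**")
                ++ " **" ++ name ++ "** — " ++ PySem.Int.toStr score ++ " "
                ++ (if score == 1 then "pt" else "pts")], some score, i + 1) from by
            simp [pvAStep, hne]]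
      -- split rest into the run of equal scores and the remainder
      have hsplit : rest = rest.takeWhile (fun p => p.2 == score)
          ++ rest.dropWhile (fun p => p.2 == score) :=
        (List.takeWhile_append_dropWhile).symm
      have hrun : ∀ p ∈ rest.takeWhile (fun p => p.2 == score), p.2 = score := by
        intro p hp
        have := List.mem_takeWhile_imp hp
        simpa using this
      conv_lhs => rw [hsplit, PySem.List.enumerate_append]
      rw [pvAStep_run _ score hrun _ _ _ _]
      have hdrop : ∀ name' score' rest'',
          rest.dropWhile (fun p => p.2 == score) = (name', score') :: rest'' →
          (some score : Option Int) ≠ some score' := by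
        intro name' score' rest'' hd
        have hhead : ¬ ((fun p : String × Int => p.2 == score) (name', score')) := by
          have h1 : rest.dropWhile (fun p => p.2 == score) ≠ [] := by simp [hd]
          have := List.head_dropWhile_not (fun p : String × Int => p.2 == score) h1
          simpa [hd] using this
        simp at hhead
        simp
        intro h; exact hhead h.symm
      have hlen : (rest.dropWhile (fun p => p.2 == score)).length < ((name, score) :: rest).length := by
        have := List.length_dropWhile_le (fun p : String × Int => p.2 == score) rest
        simp; omega
      rw [ih _ (by rw [← hn]; exact hlen) _ rfl _ _ _ _ hdrop]
      -- assemble: head line ++ run lines ++ recursive lines = pvBLoop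
      conv_rhs => rw [pvBLoop]
      simp only [List.map_cons, List.append_assoc, List.cons_append, List.nil_append]
      congr 3
      apply List.map_congr_left
      intro p hp
      have hps := hrun p hp
      simp [hps]

-- ===== VERDICT (by name: the statement is the Claim_ definition above) =====
theorem leaderboard_text_py_spec : Claim_equal_leaderboard_text_py := by
  intro leaderboard max_entries _
  unfold Spec_leaderboard_text_py leaderboard_text_py leaderboard_text_py_alt
  by_cases h : leaderboard = []
  · simp [h]
  · simp only [h]
    rw [pvFold_eq_bLoop _ 0 0 none [] (by intro _ _ _ _; simp)]
    simp
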